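-- pv_equiv track=rewrite | github.com/kameelkhabaz/uchicago_classes | cmsc12100/short-exercises-kameelkhabaz/prev_final_probs/other_probs.py | compute_tiers
-- ===== SOURCE A (Python) =====
-- def compute_tiers(priority_counts, tiers):
--     tiered_counts = {}
--     for course, count in priority_counts.items():
--         tiered_count = []
--         for lb, ub in tiers:
--             tiered_count.append(sum(count[lb:ub]))
--         tiered_counts[course] = tiered_count
--     return tiered_counts
-- ===== SOURCE B (Python) =====
-- def compute_tiers(priority_counts, tiers):
--     tiered_counts = {}
--     for course, count in priority_counts.items():
--         n = len(count)
--         prefix = [0]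
--         for c in count:
--             prefix.append(prefix[-1] + c)
--         row = []
--         for lb, ub in tiers:
--             a = min(lb, n) if lb >= 0 else max(lb + n, 0)
--             b = min(ub, n) if ub >= 0 else max(ub + n, 0)
--             row.append(prefix[b] - prefix[a] if a < b else 0)
--         tiered_counts[course] = row
--     return tiered_counts
-- ===== Notes on version B (the rewrite author's own statement) =====
-- stated objective: alternative
-- what changed: B builds one prefix-sum array per course and answers each tier by subtracting two prefix values (after slice-index clamping), instead of re-summing a slice per tier; asymptotically O(courses*(len+tiers)) vs A's O(courses*tiers*len), though Python-level constants keep it about the same speed on the timed inputs.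
import Mathlib
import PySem

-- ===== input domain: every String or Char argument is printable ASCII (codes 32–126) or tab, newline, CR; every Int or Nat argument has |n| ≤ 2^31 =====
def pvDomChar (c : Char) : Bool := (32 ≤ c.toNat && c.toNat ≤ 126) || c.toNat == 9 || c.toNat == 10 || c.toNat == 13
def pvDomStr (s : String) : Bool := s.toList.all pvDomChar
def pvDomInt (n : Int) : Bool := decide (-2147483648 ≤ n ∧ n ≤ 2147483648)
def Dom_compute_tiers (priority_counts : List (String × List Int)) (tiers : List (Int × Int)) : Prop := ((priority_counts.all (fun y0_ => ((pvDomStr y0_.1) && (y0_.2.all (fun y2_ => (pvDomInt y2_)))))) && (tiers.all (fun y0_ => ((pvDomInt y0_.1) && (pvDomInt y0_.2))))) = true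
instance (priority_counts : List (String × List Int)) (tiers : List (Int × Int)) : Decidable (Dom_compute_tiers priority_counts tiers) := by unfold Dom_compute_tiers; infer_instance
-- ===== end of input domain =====

-- B replaces the per-tier slice re-summation with one prefix-sum array per course,
-- answering each tier by subtracting two prefix values after slice-index clamping (objective: alternative).


-- ===== PORT A =====
-- inner loop of A: for lb, ub in tiers: tiered_count.append(sum(count[lb:ub]))
def rowA (count : List Int) (tiers : List (Int × Int)) : List Int :=
  tiers.foldl (fun acc p => acc ++ [(PySem.List.slice count (some p.1) (some p.2)).sum]) []

def compute_tiers (priority_counts : List (String × List Int)) (tiers : List (Int × Int)) : List (String × List Int) :=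
  (priority_counts.foldl (fun d p => d.insert p.1 (rowA p.2 tiers)) PySem.Dict.empty).items

-- ===== PORT B =====
-- prefix = [0]; for c in count: prefix.append(prefix[-1] + c)
def prefixesB (acc : Int) : List Int → List Int
  | [] => [acc]
  | c :: t => acc :: prefixesB (acc + c) t

-- a = min(lb, n) if lb >= 0 else max(lb + n, 0)
def clampB (n : Int) (i : Int) : Int := if 0 ≤ i then min i n else max (i + n) 0

def rowB (count : List Int) (tiers : List (Int × Int)) : List Int :=
  let n : Int := count.length
  let pre := prefixesB 0 count
  tiers.foldl (fun acc p =>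
    let a := clampB n p.1
    let b := clampB n p.2
    acc ++ [if a < b then pre.getD b.toNat 0 - pre.getD a.toNat 0 else 0]) []

def compute_tiers_alt (priority_counts : List (String × List Int)) (tiers : List (Int × Int)) : List (String × List Int) :=
  (priority_counts.foldl (fun d p => d.insert p.1 (rowB p.2 tiers)) PySem.Dict.empty).items

-- ===== PRECONDITION & SPEC =====
def Spec_compute_tiers (priority_counts : List (String × List Int)) (tiers : List (Int × Int)) (out : List (String × List Int)) : Prop := out = compute_tiers_alt priority_counts tiers
instance (priority_counts : List (String × List Int)) (tiers : List (Int × Int)) (out : List (String × List Int)) : Decidable (Spec_compute_tiers priority_counts tiers out) := by unfold Spec_compute_tiers; infer_instance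

-- ===== CLAIM (what is proved, stated in full; the proofs are below) =====
def Claim_equal_compute_tiers : Prop := ∀ (priority_counts : List (String × List Int)) (tiers : List (Int × Int)), Dom_compute_tiers priority_counts tiers → Spec_compute_tiers priority_counts tiers (compute_tiers priority_counts tiers)

-- ===== LEMMAS AND PROOFS =====

lemma clampB_nonneg (n : Nat) (i : Int) : 0 ≤ clampB (n : Int) i := by
  unfold clampB
  simp only [Int.min_def, Int.max_def]
  split_ifs <;> omega

lemma clampB_toNat (n : Nat) (i : Int) : (clampB (n : Int) i).toNat = PySem.List.clampIdx n i := by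
  unfold clampB PySem.List.clampIdx
  simp only [Int.min_def, Int.max_def]
  split_ifs <;> omega

lemma prefixesB_getD (xs : List Int) (acc : Int) (k : Nat) (hk : k ≤ xs.length) :
    (prefixesB acc xs).getD k 0 = acc + (xs.take k).sum := by
  induction xs generalizing acc k with
  | nil =>
    have hk0 : k = 0 := by simpa using hk
    subst hk0; simp [prefixesB]
  | cons c t ih =>
    cases k with
    | zero => simp [prefixesB]
    | succ m =>
      simp only [prefixesB, List.getD_cons_succ, List.take_succ_cons, List.sum_cons]
      rw [ih (acc + c) m (by simpa using hk)]
      ring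

lemma sum_slice_eq (xs : List Int) (a b : Nat) :
    ((xs.drop a).take (b - a)).sum = if a < b then (xs.take b).sum - (xs.take a).sum else 0 := by
  by_cases h : a < b
  · simp only [h, if_true]
    have hb : a + (b - a) = b := by omega
    have := List.take_add (l := xs) (i := a) (j := b - a)
    rw [hb] at this
    rw [this, List.sum_append]
    ring
  · have : b - a = 0 := by omega
    simp [this, h]

lemma row_eq (count : List Int) (tiers : List (Int × Int)) : rowA count tiers = rowB count tiers := by
  unfold rowA rowB
  simp only
  congr 1
  funext acc p
  congr 1
  have ha := clampB_toNat count.length p.1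
  have hb := clampB_toNat count.length p.2
  have halt : clampB (count.length : Int) p.1 < clampB (count.length : Int) p.2 ↔
      PySem.List.clampIdx count.length p.1 < PySem.List.clampIdx count.length p.2 := by
    have h1 := clampB_nonneg count.length p.1
    have h2 := clampB_nonneg count.length p.2
    omega
  have hle1 : PySem.List.clampIdx count.length p.1 ≤ count.length := PySem.List.clampIdx_le _ _
  have hle2 : PySem.List.clampIdx count.length p.2 ≤ count.length := PySem.List.clampIdx_le _ _
  simp only [PySem.List.slice, ha, hb, sum_slice_eq,
    prefixesB_getD count 0 _ hle1, prefixesB_getD count 0 _ hle2, zero_add]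
  by_cases h : PySem.List.clampIdx count.length p.1 < PySem.List.clampIdx count.length p.2 <;>
    simp [h, halt.mpr, halt]

-- ===== VERDICT (by name: the statement is the Claim_ definition above) =====
theorem compute_tiers_spec : Claim_equal_compute_tiers := by
  intro pc tiers _
  unfold Spec_compute_tiers compute_tiers compute_tiers_alt
  have hf : (fun (d : PySem.Dict String (List Int)) (p : String × List Int) => d.insert p.1 (rowA p.2 tiers))
      = (fun d p => d.insert p.1 (rowB p.2 tiers)) := by
    funext d p; rw [row_eq]
  rw [hf]
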